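-- pv_equiv track=rewrite | github.com/sparesparrow/eleven-audiobooks | split_markdown.py | find_last_period_line
-- ===== SOURCE A (Python) =====
-- def ends_with_period(text: str) -> bool:
--     """
--     Check if a line of text ends with a period.
--     Handles cases where the line might end with newline characters.
--
--     Args:
--         text: The line of text to check
--
--     Returns:
--         bool: True if the line ends with a period, False otherwise
--     """
--     stripped = text.rstrip('\n\r')
--     return stripped.endswith('.')
--
-- def find_last_period_line(lines: list[str], start_idx: int, max_chars: int) -> int:
--     """
--     Find the last line that ends with a period within the character limit.
--
--     Args:
--         lines: List of lines to check
--         start_idx: Starting index in the lines list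
--         max_chars: Maximum number of characters allowed
--
--     Returns:
--         int: Index of the last line ending with a period within the limit,
--              or the last possible line if no period is found
--     """
--     current_chars = 0
--     last_period_idx = None
--
--     for i, line in enumerate(lines[start_idx:], start_idx):
--         if current_chars + len(line) > max_chars:
--             break
--
--         current_chars += len(line)
--         if ends_with_period(line):
--             last_period_idx = i
--
--     # If we found no period, return the last possible line within the limit
--     if last_period_idx is None:
--         # Find the last line that fits within the character limit
--         i = start_idx
--         chars_sum = 0
--         while i < len(lines) and chars_sum + len(lines[i]) <= max_chars:
--             chars_sum += len(lines[i])
--             i += 1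
--         return i - 1
--
--     return last_period_idx
-- ===== SOURCE B (Python) =====
-- def find_last_period_line(lines: list[str], start_idx: int, max_chars: int) -> int:
--     """Single accumulating pass: track both the last fitting line and the last
--     period-ending line, so no second rescan is needed."""
--     current_chars = 0
--     last_fit_idx = start_idx - 1
--     last_period_idx = None
--     i = start_idx
--     for line in lines[start_idx:]:
--         if current_chars + len(line) > max_chars:
--             break
--         current_chars += len(line)
--         last_fit_idx = i
--         if line.rstrip('\n\r').endswith('.'):
--             last_period_idx = i
--         i += 1
--     return last_fit_idx if last_period_idx is None else last_period_idx
-- ===== Notes on version B (the rewrite author's own statement) =====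
-- stated objective: simpler
-- what changed: B folds A's conditional second rescan ('while no period found, re-walk lines to find the last fitting one') into the single accumulating pass by also tracking last_fit_idx, so the list is traversed exactly once.
-- outside the precondition, e.g. on find_last_period_line(['a', 'b'], -1, 10): A returns 1, B returns -1
import Mathlib
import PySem

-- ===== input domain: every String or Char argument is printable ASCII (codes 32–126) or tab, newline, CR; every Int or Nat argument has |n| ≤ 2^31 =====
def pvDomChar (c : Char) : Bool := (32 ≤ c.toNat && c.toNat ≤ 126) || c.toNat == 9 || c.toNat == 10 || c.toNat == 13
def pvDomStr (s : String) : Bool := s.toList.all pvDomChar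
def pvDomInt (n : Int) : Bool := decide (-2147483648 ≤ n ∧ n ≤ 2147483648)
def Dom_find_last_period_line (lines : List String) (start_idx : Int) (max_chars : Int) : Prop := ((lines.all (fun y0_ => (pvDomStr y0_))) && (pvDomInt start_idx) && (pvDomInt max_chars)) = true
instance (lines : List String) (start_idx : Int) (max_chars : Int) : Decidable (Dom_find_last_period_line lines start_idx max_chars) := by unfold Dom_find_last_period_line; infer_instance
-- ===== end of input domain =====

-- B collapses A's conditional second rescan into one accumulating pass that also tracks the last fitting index (objective: simpler).


-- ===== PORT A =====
-- helper ends_with_period: text.rstrip('\n\r').endswith('.'); PySem has no directional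
-- rstrip-with-chars, so it is ported by hand (reverse / dropWhile / reverse), exact on all strings.
def ends_with_period (text : String) : Bool :=
  PySem.Chars.endswith ((text.toList.reverse.dropWhile (fun c => c == '\n' || c == '\r')).reverse) ['.']

-- the first for-loop of A: for i, line in enumerate(lines[start_idx:], start_idx), with break
def aLoop (maxc : Int) : List (Int × String) → Int → Option Int → Option Int
  | [], _, lp => lp
  | (i, line) :: rest, cur, lp =>
    if cur + PySem.Str.len line > maxc then lp
    else aLoop maxc rest (cur + PySem.Str.len line) (if ends_with_period line then some i else lp)

-- the fallback while-loop of A; pyGet? lines i = none is Python's IndexError (excluded by Pre_),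
-- the value returned there is arbitrary
def aWhile (lines : List String) (maxc : Int) (i : Int) (chars : Int) : Int :=
  if _h : i < (lines.length : Int) then
    match PySem.List.pyGet? lines i with
    | none => i - 1
    | some line =>
      if chars + PySem.Str.len line ≤ maxc then aWhile lines maxc (i + 1) (chars + PySem.Str.len line)
      else i - 1
  else i - 1
termination_by ((lines.length : Int) - i).toNat
decreasing_by omega

def find_last_period_line (lines : List String) (start_idx : Int) (max_chars : Int) : Int :=
  let last_period_idx :=
    aLoop max_chars (PySem.List.enumerate (PySem.List.slice lines (some start_idx) none) start_idx) 0 none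
  match last_period_idx with
  | none => aWhile lines max_chars start_idx 0
  | some idx => idx

-- ===== PORT B =====
-- inline period test of Source B: line.rstrip('\n\r').endswith('.')
def endsPeriodB (line : String) : Bool :=
  PySem.Chars.endswith ((line.toList.reverse.dropWhile (fun c => c == '\n' || c == '\r')).reverse) ['.']

-- Source B's single pass: for line in lines[start_idx:], carrying i, current_chars, last_fit_idx, last_period_idx
def bLoop (maxc : Int) : List String → Int → Int → Int → Option Int → Int × Option Int
  | [], _, _, fit, lp => (fit, lp)
  | line :: rest, i, cur, fit, lp =>
    if cur + PySem.Str.len line > maxc then (fit, lp)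
    else bLoop maxc rest (i + 1) (cur + PySem.Str.len line) i (if endsPeriodB line then some i else lp)

def find_last_period_line_alt (lines : List String) (start_idx : Int) (max_chars : Int) : Int :=
  let r := bLoop max_chars (PySem.List.slice lines (some start_idx) none) start_idx 0 (start_idx - 1) none
  match r.2 with
  | none => r.1
  | some p => p

-- ===== PRECONDITION & SPEC =====
-- Pre_ excludes negative start_idx, outside the splitter's natural domain: there A's fallback
-- rescan indexes lines[i] directly from the negative i (raising IndexError once start_idx <
-- -len(lines)) while its first pass enumerates the wrapped-around slice, so the index A returns
-- in the no-period case is an accident of mixing the two addressings.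
def Pre_find_last_period_line (_lines : List String) (start_idx : Int) (_max_chars : Int) : Prop :=
  0 ≤ start_idx
instance (lines : List String) (start_idx : Int) (max_chars : Int) : Decidable (Pre_find_last_period_line lines start_idx max_chars) := by unfold Pre_find_last_period_line; infer_instance

def pvWitness_find_last_period_line : List String × Int × Int := (["a.", "bb"], 0, 10)

def Spec_find_last_period_line (lines : List String) (start_idx : Int) (max_chars : Int) (out : Int) : Prop := out = find_last_period_line_alt lines start_idx max_chars
instance (lines : List String) (start_idx : Int) (max_chars : Int) (out : Int) : Decidable (Spec_find_last_period_line lines start_idx max_chars out) := by unfold Spec_find_last_period_line; infer_instance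

-- ===== CLAIM (what is proved, stated in full; the proofs are below) =====
def Claim_equal_find_last_period_line : Prop := ∀ (lines : List String) (start_idx : Int) (max_chars : Int), Dom_find_last_period_line lines start_idx max_chars → Pre_find_last_period_line lines start_idx max_chars → Spec_find_last_period_line lines start_idx max_chars (find_last_period_line lines start_idx max_chars)

-- ===== LEMMAS AND PROOFS =====

-- A's fallback while-loop rephrased as structural recursion over the remaining lines
def wLoop (maxc : Int) : List String → Int → Int → Int
  | [], i, _ => i - 1
  | line :: rest, i, cur =>
    if cur + PySem.Str.len line ≤ maxc then wLoop maxc rest (i + 1) (cur + PySem.Str.len line)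
    else i - 1

theorem aWhile_eq_wLoop (lines : List String) (maxc : Int) :
    ∀ (n : Nat) (i cur : Int), 0 ≤ i → lines.length - i.toNat ≤ n →
      aWhile lines maxc i cur = wLoop maxc (lines.drop i.toNat) i cur := by
  intro n
  induction n with
  | zero =>
    intro i cur hi hn
    rw [aWhile]
    have hlen : lines.length ≤ i.toNat := by omega
    have : ¬ (i < (lines.length : Int)) := by omega
    simp only [this, dite_false]
    rw [List.drop_eq_nil_of_le hlen]
    rfl
  | succ n ih =>
    intro i cur hi hn
    rw [aWhile]
    by_cases h : i < (lines.length : Int)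
    · have hlt : i.toNat < lines.length := by omega
      have hdrop : lines.drop i.toNat = lines[i.toNat] :: lines.drop (i.toNat + 1) :=
        List.drop_eq_getElem_cons hlt
      have hget : PySem.List.pyGet? lines i = some lines[i.toNat] :=
        PySem.List.pyGet?_eq_some_getElem lines hi (by omega)
      simp only [h, dite_true, hdrop, wLoop]
      rw [hget]
      by_cases hc : cur + PySem.Str.len lines[i.toNat] ≤ maxc
      · simp only [hc, if_true]
        have := ih (i + 1) (cur + PySem.Str.len lines[i.toNat]) (by omega) (by omega)
        rw [this]
        have : (i + 1).toNat = i.toNat + 1 := by omega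
        rw [this]
      · simp only [hc, if_false]
    · simp only [h, dite_false]
      have : lines.drop i.toNat = [] := List.drop_eq_nil_of_le (by omega)
      rw [this]
      rfl

theorem endsPeriodB_eq (line : String) : ends_with_period line = endsPeriodB line := rfl

theorem bLoop_eq (maxc : Int) :
    ∀ (l : List String) (i cur : Int) (lp : Option Int),
      bLoop maxc l i cur (i - 1) lp =
        (wLoop maxc l i cur, aLoop maxc (PySem.List.enumerate l i) cur lp) := by
  intro l
  induction l with
  | nil =>
    intro i cur lp
    simp [bLoop, wLoop, PySem.List.enumerate_nil, aLoop]
  | cons line rest ih =>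
    intro i cur lp
    rw [PySem.List.enumerate_cons]
    simp only [bLoop, wLoop, aLoop, endsPeriodB_eq]
    by_cases hc : cur + PySem.Str.len line > maxc
    · have hgt : ¬ (cur + PySem.Str.len line ≤ maxc) := by omega
      simp only [hc, hgt, if_true, if_false]
    · have hle : cur + PySem.Str.len line ≤ maxc := by omega
      simp only [hc, hle, if_true, if_false]
      have h := ih (i + 1) (cur + PySem.Str.len line)
        (if endsPeriodB line then some i else lp)
      simpa using h

-- ===== VERDICT (by name: the statement is the Claim_ definition above) =====
theorem find_last_period_line_spec : Claim_equal_find_last_period_line := by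
  intro lines start_idx max_chars _hdom hpre
  unfold Spec_find_last_period_line
  unfold find_last_period_line find_last_period_line_alt
  have hpre' : 0 ≤ start_idx := hpre
  have hslice : PySem.List.slice lines (some start_idx) none = lines.drop start_idx.toNat :=
    PySem.List.slice_from lines hpre'
  rw [hslice, bLoop_eq]
  rw [aWhile_eq_wLoop lines max_chars (lines.length - start_idx.toNat) start_idx 0 hpre' le_rfl]
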